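-- pv_equiv track=rewrite | github.com/Topaz2205/new-changes- | app/DB/db.py | _convert_qmark_to_psycopg
-- ===== SOURCE A (Python) =====
-- from typing import Any, Iterable, Optional
--
-- def _convert_qmark_to_psycopg(sql: str) -> str:
--     out: list[str] = []
--     in_single = False
--     in_double = False
--     in_dollar: Optional[str] = None
--     i = 0
--     while i < len(sql):
--         ch = sql[i]
--
--         # זיהוי $$ או $tag$
--         if not in_single and not in_double:
--             if in_dollar is None and ch == "$":
--                 j = i + 1
--                 while j < len(sql) and (sql[j].isalnum() or sql[j] == "_"):
--                     j += 1
--                 if j < len(sql) and sql[j] == "$":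
--                     in_dollar = sql[i:j+1]
--                     out.append(in_dollar)
--                     i = j + 1
--                     continue
--             elif in_dollar is not None and sql.startswith(in_dollar, i):
--                 out.append(in_dollar)
--                 i += len(in_dollar)
--                 in_dollar = None
--                 continue
--
--         if in_dollar is None:
--             if ch == "'" and not in_double:
--                 in_single = not in_single
--                 out.append(ch); i += 1; continue
--             if ch == '"' and not in_single:
--                 in_double = not in_double
--                 out.append(ch); i += 1; continue
--
--         if ch == "?" and not in_single and not in_double and in_dollar is None:
--             out.append("%s")
--         else:
--             out.append(ch)
--         i += 1
--     return "".join(out)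
-- ===== SOURCE B (Python) =====
-- def _convert_qmark_to_psycopg(sql: str) -> str:
--     # Region-based scanner: consume whole quoted/dollar-quoted regions in one
--     # jump instead of per-character boolean state.
--     out = []
--     i = 0
--     n = len(sql)
--     while i < n:
--         ch = sql[i]
--         if ch == "'":
--             e = sql.find("'", i + 1)
--             if e == -1:
--                 out.append(sql[i:]); break
--             out.append(sql[i:e + 1]); i = e + 1
--         elif ch == '"':
--             e = sql.find('"', i + 1)
--             if e == -1:
--                 out.append(sql[i:]); break
--             out.append(sql[i:e + 1]); i = e + 1
--         elif ch == "$":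
--             j = i + 1
--             while j < n and (sql[j].isalnum() or sql[j] == "_"):
--                 j += 1
--             if j < n and sql[j] == "$":
--                 tag = sql[i:j + 1]
--                 e = sql.find(tag, j + 1)
--                 if e == -1:
--                     out.append(sql[i:]); break
--                 out.append(sql[i:e] + tag); i = e + len(tag)
--             else:
--                 out.append(ch); i += 1
--         elif ch == "?":
--             out.append("%s"); i += 1
--         else:
--             out.append(ch); i += 1
--     return "".join(out)
-- ===== Notes on version B (the rewrite author's own statement) =====
-- stated objective: alternative
-- what changed: Replaced the per-character boolean state machine (in_single/in_double/in_dollar flags carried across every character) with a region-based scanner that, on meeting a quote or dollar tag, finds the closing delimiter with str.find and copies the whole quoted region in one jump, so only top-level characters are examined for placeholder substitution.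
import Mathlib
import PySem

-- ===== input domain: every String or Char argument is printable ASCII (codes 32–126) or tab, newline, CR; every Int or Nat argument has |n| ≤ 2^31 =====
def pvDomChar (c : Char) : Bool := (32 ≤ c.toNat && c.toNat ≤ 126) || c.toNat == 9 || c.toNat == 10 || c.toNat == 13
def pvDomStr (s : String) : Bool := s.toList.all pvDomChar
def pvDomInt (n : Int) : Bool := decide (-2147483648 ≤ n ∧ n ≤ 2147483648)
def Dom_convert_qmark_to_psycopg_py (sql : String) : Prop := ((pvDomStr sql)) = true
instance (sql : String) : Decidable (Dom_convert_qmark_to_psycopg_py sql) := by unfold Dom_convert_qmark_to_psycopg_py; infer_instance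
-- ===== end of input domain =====

-- B scans by regions (jump to the closing quote / closing dollar tag with a find)
-- instead of A's per-character boolean state machine; same cost, plainer flow.

-- ===== PORT A =====
-- sql[j].isalnum() or sql[j] == "_"  (exact on the ASCII domain)
def pvTagChar (c : Char) : Bool := c.isAlphanum || c == '_'

-- the inner `while j < len(sql) and …: j += 1` loop of A (number of steps taken);
-- B's python contains the identical loop, so both ports use it
def countLead : List Char → Nat
  | [] => 0
  | c :: t => if pvTagChar c then countLead t + 1 else 0

-- the while loop of A over the remaining suffix; state = (in_single, in_double, in_dollar)
def goA : List Char → Bool → Bool → Option (List Char) → List Char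
  | [], _, _, _ => []
  | ch :: rest, in_single, in_double, none =>
      -- `if in_dollar is None and ch == "$"` under `if not in_single and not in_double`
      if in_single = false ∧ in_double = false ∧ ch = '$' ∧
         countLead rest < rest.length ∧ rest.getD (countLead rest) ' ' = '$' then
        ('$' :: (rest.take (countLead rest) ++ ['$'])) ++
          goA (rest.drop (countLead rest + 1)) in_single in_double
            (some ('$' :: (rest.take (countLead rest) ++ ['$'])))
      else if ch = '\'' ∧ in_double = false then
        '\'' :: goA rest (!in_single) in_double none
      else if ch = '"' ∧ in_single = false then
        '"' :: goA rest in_single (!in_double) none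
      else if ch = '?' ∧ in_single = false ∧ in_double = false then
        '%' :: 's' :: goA rest in_single in_double none
      else ch :: goA rest in_single in_double none
  | ch :: rest, in_single, in_double, some t =>
      -- `elif in_dollar is not None and sql.startswith(in_dollar, i)`;
      -- rest.drop (t.length - 1) = (ch :: rest).drop t.length for the nonempty tags A builds
      if in_single = false ∧ in_double = false ∧ t.isPrefixOf (ch :: rest) then
        t ++ goA (rest.drop (t.length - 1)) in_single in_double none
      else ch :: goA rest in_single in_double (some t)
  termination_by s _ _ _ => s.length
  decreasing_by all_goals (simp [List.length_drop]; try omega)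

def convert_qmark_to_psycopg_py (sql : String) : String :=
  String.ofList (goA sql.toList false false none)

-- ===== PORT B =====
-- sql.find(tag, p) relative to a suffix: first index where tag is a prefix
def findSub (pat : List Char) : List Char → Option Nat
  | [] => if pat.isPrefixOf [] then some 0 else none
  | c :: t => if pat.isPrefixOf (c :: t) then some 0 else (findSub pat t).map (· + 1)

-- B's while loop over the remaining suffix (no state: regions are consumed whole)
def goB : List Char → List Char
  | [] => []
  | ch :: rest =>
    if ch = '\'' then
      match PySem.List.index? rest '\'' with
      | none => ch :: rest
      | some e => (ch :: rest.take (e + 1)) ++ goB (rest.drop (e + 1))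
    else if ch = '"' then
      match PySem.List.index? rest '"' with
      | none => ch :: rest
      | some e => (ch :: rest.take (e + 1)) ++ goB (rest.drop (e + 1))
    else if ch = '$' ∧ countLead rest < rest.length ∧ rest.getD (countLead rest) ' ' = '$' then
      match findSub ('$' :: (rest.take (countLead rest) ++ ['$'])) (rest.drop (countLead rest + 1)) with
      | none => ch :: rest
      | some p =>
          (('$' :: (rest.take (countLead rest) ++ ['$'])) ++
             (rest.drop (countLead rest + 1)).take p ++
             ('$' :: (rest.take (countLead rest) ++ ['$']))) ++
            goB ((rest.drop (countLead rest + 1)).drop (p + (countLead rest + 2)))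
    else if ch = '?' then '%' :: 's' :: goB rest
    else ch :: goB rest
  termination_by s => s.length
  decreasing_by all_goals (simp [List.length_drop]; try omega)

def convert_qmark_to_psycopg_py_alt (sql : String) : String :=
  String.ofList (goB sql.toList)

-- ===== PRECONDITION & SPEC =====
def Spec_convert_qmark_to_psycopg_py (sql : String) (out : String) : Prop := out = convert_qmark_to_psycopg_py_alt sql
instance (sql : String) (out : String) : Decidable (Spec_convert_qmark_to_psycopg_py sql out) := by unfold Spec_convert_qmark_to_psycopg_py; infer_instance

-- ===== CLAIM (what is proved, stated in full; the proofs are below) =====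
def Claim_equal_convert_qmark_to_psycopg_py : Prop := ∀ (sql : String), Dom_convert_qmark_to_psycopg_py sql → Spec_convert_qmark_to_psycopg_py sql (convert_qmark_to_psycopg_py sql)

-- ===== LEMMAS AND PROOFS =====

-- inside a single-quoted region A copies characters until the closing quote
theorem goA_single (s : List Char) :
    goA s true false none =
      match PySem.List.index? s '\'' with
      | none => s
      | some e => s.take (e + 1) ++ goA (s.drop (e + 1)) false false none := by
  induction s with
  | nil => simp [goA]
  | cons c rest ih =>
    by_cases hc : c = '\''
    · subst hc
      rw [PySem.List.index?_cons_self]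
      simp [goA]
    · rw [PySem.List.index?_cons_of_ne _ (by simpa using hc)]
      cases h : PySem.List.index? rest '\'' with
      | none =>
        have := ih; rw [h] at this
        simp [goA, hc, this]
      | some e =>
        have := ih; rw [h] at this
        simp [goA, hc, this]

-- inside a double-quoted region A copies characters until the closing quote
theorem goA_double (s : List Char) :
    goA s false true none =
      match PySem.List.index? s '"' with
      | none => s
      | some e => s.take (e + 1) ++ goA (s.drop (e + 1)) false false none := by
  induction s with
  | nil => simp [goA]
  | cons c rest ih =>
    by_cases hc : c = '"'
    · subst hc
      rw [PySem.List.index?_cons_self]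
      simp [goA]
    · rw [PySem.List.index?_cons_of_ne _ (by simpa using hc)]
      cases h : PySem.List.index? rest '"' with
      | none =>
        have := ih; rw [h] at this
        simp [goA, hc, this]
      | some e =>
        have := ih; rw [h] at this
        simp [goA, hc, this]

-- inside a dollar-quoted region A copies characters until the closing tag
theorem goA_dollar (t s : List Char) (ht : t ≠ []) :
    goA s false false (some t) =
      match findSub t s with
      | none => s
      | some p => s.take p ++ t ++ goA (s.drop (p + t.length)) false false none := by
  induction s with
  | nil =>
    cases t with
    | nil => exact absurd rfl ht
    | cons a t' => simp [goA, findSub, List.isPrefixOf]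
  | cons c rest ih =>
    by_cases hp : t.isPrefixOf (c :: rest)
    · cases t with
      | nil => exact absurd rfl ht
      | cons a t' => simp [goA, findSub, hp]
    · cases h : findSub t rest with
      | none =>
        have := ih; rw [h] at this
        simp [goA, findSub, hp, h, this]
      | some p =>
        have := ih; rw [h] at this
        have harith : p + 1 + t.length = (p + t.length) + 1 := by omega
        simp [goA, findSub, hp, h, this, harith]

theorem goA_eq_goB_aux : ∀ (n : Nat) (s : List Char), s.length ≤ n → goA s false false none = goB s := by
  intro n
  induction n with
  | zero =>
    intro s hs
    have : s = [] := List.eq_nil_of_length_eq_zero (Nat.le_zero.mp hs)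
    subst this; simp [goA, goB]
  | succ n ih =>
    intro s hs
    match s with
    | [] => simp [goA, goB]
    | c :: rest =>
      have hrest : rest.length ≤ n := by simpa using hs
      by_cases hq : c = '\''
      · subst hq
        rw [show goA ('\'' :: rest) false false none = '\'' :: goA rest true false none from by
              simp [goA]]
        rw [goA_single, PySem.List.index?_eq_idxOf?]
        cases h : List.idxOf? '\'' rest with
        | none => simp [goB, h]
        | some e =>
          have hlen : (rest.drop (e + 1)).length ≤ n := by
            simp [List.length_drop]; omega
          simp [goB, h, ih _ hlen]
      · by_cases hd : c = '"'
        · subst hd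
          rw [show goA ('"' :: rest) false false none = '"' :: goA rest false true none from by
                simp [goA]]
          rw [goA_double, PySem.List.index?_eq_idxOf?]
          cases h : List.idxOf? '"' rest with
          | none => simp [goB, hq, h]
          | some e =>
            have hlen : (rest.drop (e + 1)).length ≤ n := by
              simp [List.length_drop]; omega
            simp [goB, hq, h, ih _ hlen]
        · by_cases hdol : c = '$'
          · subst hdol
            by_cases hcl : countLead rest < rest.length
            · by_cases hg : rest[countLead rest]'hcl = '$'
              · have hklen : (List.take (countLead rest) rest).length = countLead rest := by
                  simp [List.length_take]; omega
                have htag : ('$' :: (List.take (countLead rest) rest ++ ['$'])).length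
                    = countLead rest + 2 := by simp [hklen]
                rw [show goA ('$' :: rest) false false none =
                      ('$' :: (rest.take (countLead rest) ++ ['$'])) ++
                        goA (rest.drop (countLead rest + 1)) false false
                          (some ('$' :: (rest.take (countLead rest) ++ ['$']))) from by
                      simp [goA, hcl, hg]]
                rw [goA_dollar _ _ (by simp)]
                cases h : findSub ('$' :: (rest.take (countLead rest) ++ ['$']))
                    (rest.drop (countLead rest + 1)) with
                | none =>
                  have hrecon : rest.take (countLead rest) ++ '$' :: rest.drop (countLead rest + 1)
                      = rest := by
                    conv_rhs => rw [← List.take_append_drop (countLead rest) rest]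
                    rw [List.drop_eq_getElem_cons hcl, hg]
                  simp [goB, hq, hd, hcl, hg, h, hrecon]
                | some p =>
                  have hlen : (rest.drop (countLead rest + 1 + (p + (countLead rest + 2)))).length
                      ≤ n := by simp [List.length_drop]; omega
                  simp [goB, hq, hd, hcl, hg, h, htag, ih _ hlen]
              · rw [show goA ('$' :: rest) false false none = '$' :: goA rest false false none from by
                      simp [goA, List.getElem?_eq_getElem hcl, hg]]
                simp [goB, hq, hd, List.getElem?_eq_getElem hcl, hg, ih _ hrest]
            · rw [show goA ('$' :: rest) false false none = '$' :: goA rest false false none from by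
                    simp [goA, hcl]]
              simp [goB, hq, hd, hcl, ih _ hrest]
          · by_cases hqm : c = '?'
            · subst hqm
              rw [show goA ('?' :: rest) false false none = '%' :: 's' :: goA rest false false none from by
                    simp [goA]]
              simp [goB, hq, hd, ih _ hrest]
            · rw [show goA (c :: rest) false false none = c :: goA rest false false none from by
                    simp [goA, hq, hd, hdol, hqm]]
              simp [goB, hq, hd, hdol, hqm, ih _ hrest]

theorem goA_eq_goB (s : List Char) : goA s false false none = goB s :=
  goA_eq_goB_aux s.length s (le_refl _)

-- ===== VERDICT (by name: the statement is the Claim_ definition above) =====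
theorem convert_qmark_to_psycopg_py_spec : Claim_equal_convert_qmark_to_psycopg_py := by
  intro sql _
  unfold Spec_convert_qmark_to_psycopg_py convert_qmark_to_psycopg_py convert_qmark_to_psycopg_py_alt
  rw [goA_eq_goB]
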